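-- pv_equiv track=rewrite | github.com/nintynick/Spore | spore/workspace/batching.py | scale_device_batch_size
-- ===== SOURCE A (Python) =====
-- def scale_device_batch_size(
--     base_batch_size: int,
--     resource_pct: int,
--     total_batch_size: int,
--     max_seq_len: int,
-- ) -> int:
--     """Scale batch size by resource percent and snap to a valid divisor."""
--     requested = max(1, int(base_batch_size * resource_pct / 100))
--     for batch_size in range(requested, 0, -1):
--         if total_batch_size % (batch_size * max_seq_len) == 0:
--             return batch_size
--     return 1
-- ===== SOURCE B (Python) =====
-- def scale_device_batch_size(
--     base_batch_size: int,
--     resource_pct: int,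
--     total_batch_size: int,
--     max_seq_len: int,
-- ) -> int:
--     """Scale batch size by resource percent and snap to a valid divisor.
--
--     Divisor-enumeration version: batch_size * max_seq_len divides total iff
--     max_seq_len divides total and batch_size divides n = |total // max_seq_len|,
--     so enumerate divisor pairs of n up to sqrt(n) and keep the largest one
--     that is <= requested, instead of counting down from requested."""
--     requested = max(1, int(base_batch_size * resource_pct / 100))
--     if total_batch_size % max_seq_len != 0:
--         return 1
--     n = abs(total_batch_size // max_seq_len)
--     if n == 0:
--         return requested
--     best = 1
--     d = 1
--     while d * d <= n:
--         if n % d == 0: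
--             if d <= requested and d > best:
--                 best = d
--             e = n // d
--             if e <= requested and e > best:
--                 best = e
--         d += 1
--     return best
-- ===== Notes on version B (the rewrite author's own statement) =====
-- stated objective: faster
-- what changed: B replaces A's linear countdown from `requested` (one trial division of total per candidate) by a single divisibility test of total by max_seq_len followed by enumeration of the divisor pairs of |total // max_seq_len| up to its square root, keeping the largest divisor that is <= requested.
-- outside the precondition, e.g. on scale_device_batch_size(741826435, 1364852020, 0, 1): A returns 10124833082991488, B returns 10124833082991488
import Mathlib
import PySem

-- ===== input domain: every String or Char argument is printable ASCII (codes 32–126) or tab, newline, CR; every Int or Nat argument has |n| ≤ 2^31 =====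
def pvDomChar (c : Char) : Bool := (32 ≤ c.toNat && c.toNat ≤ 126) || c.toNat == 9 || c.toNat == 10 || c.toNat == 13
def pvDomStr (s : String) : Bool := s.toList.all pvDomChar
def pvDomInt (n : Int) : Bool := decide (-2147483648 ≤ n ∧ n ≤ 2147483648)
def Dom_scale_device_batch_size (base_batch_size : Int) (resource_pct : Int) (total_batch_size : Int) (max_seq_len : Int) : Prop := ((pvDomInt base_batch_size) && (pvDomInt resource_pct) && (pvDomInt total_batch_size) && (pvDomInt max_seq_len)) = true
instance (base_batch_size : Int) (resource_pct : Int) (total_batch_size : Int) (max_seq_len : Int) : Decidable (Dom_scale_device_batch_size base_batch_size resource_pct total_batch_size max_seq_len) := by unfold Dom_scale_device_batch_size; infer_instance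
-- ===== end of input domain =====

-- B replaces A's countdown from `requested` by an enumeration of the divisor pairs of
-- |total_batch_size // max_seq_len| up to its square root; same return value on Pre_.

-- ===== PORT A =====
-- `for batch_size in range(requested, 0, -1): if total % (batch_size*max_seq_len) == 0: return batch_size`
def scaleLoopA (t m : Int) : Nat → Int
  | 0 => 1                                 -- loop fell through: `return 1`
  | k + 1 =>
    if PySem.Int.mod t (((k : Int) + 1) * m) = 0 then (k : Int) + 1
    else scaleLoopA t m k

def scale_device_batch_size (base_batch_size : Int) (resource_pct : Int) (total_batch_size : Int) (max_seq_len : Int) : Int :=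
  -- `int(x / 100)` ported as PySem.Int.truncdiv, exact for x < 2^53 (guaranteed by Pre_)
  let requested : Int := max 1 (PySem.Int.truncdiv (base_batch_size * resource_pct) 100)
  scaleLoopA total_batch_size max_seq_len requested.toNat

-- ===== PORT B =====
-- `while d*d <= n:` — d is the Python loop counter (a nonnegative int), kept as Nat
def scaleLoopB (n requested : Int) (best : Int) (d : Nat) : Int :=
  if h : (d : Int) * d ≤ n then
    let best1 :=
      if PySem.Int.mod n d = 0 then
        let best2 := if (d : Int) ≤ requested ∧ best < (d : Int) then (d : Int) else best
        let e := PySem.Int.floordiv n d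
        if e ≤ requested ∧ best2 < e then e else best2
      else best
    scaleLoopB n requested best1 (d + 1)
  else best
termination_by n.toNat + 1 - d
decreasing_by
  have hd : (d : Int) ≤ n ∨ d = 0 := by
    rcases Nat.eq_zero_or_pos d with h0 | h1
    · right; exact h0
    · left
      nlinarith [Int.natCast_pos.mpr h1]
  omega

def scale_device_batch_size_alt (base_batch_size : Int) (resource_pct : Int) (total_batch_size : Int) (max_seq_len : Int) : Int :=
  -- same `int(x / 100)` port as in A
  let requested : Int := max 1 (PySem.Int.truncdiv (base_batch_size * resource_pct) 100)
  if PySem.Int.mod total_batch_size max_seq_len ≠ 0 then 1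
  else
    let n : Int := |PySem.Int.floordiv total_batch_size max_seq_len|
    if n = 0 then requested
    else scaleLoopB n requested 1 1

-- ===== PRECONDITION & SPEC =====
-- Pre_ excludes max_seq_len = 0, where Python A raises ZeroDivisionError, and products
-- base_batch_size*resource_pct ≥ 2^53, where A still returns but Python's float expression
-- int(x / 100) can deviate from truncating integer division (see claim.json cites).
def Pre_scale_device_batch_size (base_batch_size : Int) (resource_pct : Int) (total_batch_size : Int) (max_seq_len : Int) : Prop :=
  max_seq_len ≠ 0 ∧ base_batch_size * resource_pct < 9007199254740992

instance (base_batch_size : Int) (resource_pct : Int) (total_batch_size : Int) (max_seq_len : Int) : Decidable (Pre_scale_device_batch_size base_batch_size resource_pct total_batch_size max_seq_len) := by unfold Pre_scale_device_batch_size; infer_instance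

def pvWitness_scale_device_batch_size : Int × Int × Int × Int := (10, 100, 12, 3)

def Spec_scale_device_batch_size (base_batch_size : Int) (resource_pct : Int) (total_batch_size : Int) (max_seq_len : Int) (out : Int) : Prop := out = scale_device_batch_size_alt base_batch_size resource_pct total_batch_size max_seq_len
instance (base_batch_size : Int) (resource_pct : Int) (total_batch_size : Int) (max_seq_len : Int) (out : Int) : Decidable (Spec_scale_device_batch_size base_batch_size resource_pct total_batch_size max_seq_len out) := by unfold Spec_scale_device_batch_size; infer_instance

-- ===== CLAIM (what is proved, stated in full; the proofs are below) =====
def Claim_equal_scale_device_batch_size : Prop := ∀ (base_batch_size : Int) (resource_pct : Int) (total_batch_size : Int) (max_seq_len : Int), Dom_scale_device_batch_size base_batch_size resource_pct total_batch_size max_seq_len → Pre_scale_device_batch_size base_batch_size resource_pct total_batch_size max_seq_len → Spec_scale_device_batch_size base_batch_size resource_pct total_batch_size max_seq_len (scale_device_batch_size base_batch_size resource_pct total_batch_size max_seq_len)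

-- ===== LEMMAS AND PROOFS =====

-- The value both programs compute once m ∣ t, t ≠ 0, N = |t // m|:
-- the largest divisor of N that is ≤ R, defaulting to 1.
def BBest (R : Int) (N : Nat) (v : Int) : Prop :=
  1 ≤ v ∧ (v = 1 ∨ (v.toNat ∣ N ∧ v ≤ R)) ∧ ∀ e : Nat, e ∣ N → (e : Int) ≤ R → (e : Int) ≤ v

lemma BBest_unique (R : Int) (N : Nat) {v w : Int}
    (hv : BBest R N v) (hw : BBest R N w) : v = w := by
  obtain ⟨hv1, hvs, hvmax⟩ := hv
  obtain ⟨hw1, hws, hwmax⟩ := hw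
  have hle : ∀ (a b : Int), 1 ≤ a → (a = 1 ∨ (a.toNat ∣ N ∧ a ≤ R)) →
      (∀ e : Nat, e ∣ N → (e : Int) ≤ R → (e : Int) ≤ b) → 1 ≤ b → a ≤ b := by
    intro a b ha has hbmax hb1
    rcases has with h1 | ⟨hdvd, haR⟩
    · omega
    · have := hbmax a.toNat hdvd (by omega)
      omega
  have h1 := hle _ _ hv1 hvs hwmax hw1
  have h2 := hle _ _ hw1 hws hvmax hv1
  omega

lemma loopA_best (t m : Int) (N : Nat)
    (hcond : ∀ k : Nat, 1 ≤ k → (PySem.Int.mod t ((k : Int) * m) = 0 ↔ k ∣ N)) :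
    ∀ K : Nat, 1 ≤ scaleLoopA t m K ∧
      (scaleLoopA t m K = 1 ∨ ((scaleLoopA t m K).toNat ∣ N ∧ scaleLoopA t m K ≤ (K : Int))) ∧
      ∀ e : Nat, 1 ≤ e → e ≤ K → e ∣ N → (e : Int) ≤ scaleLoopA t m K := by
  intro K
  induction K with
  | zero => exact ⟨le_refl 1, Or.inl rfl, by intro e he1 he0 _; omega⟩
  | succ k ih =>
    have hcast : ((k + 1 : Nat) : Int) = (k : Int) + 1 := by push_cast; ring
    have hiff : (PySem.Int.mod t (((k : Int) + 1) * m) = 0) ↔ (k + 1) ∣ N := by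
      rw [← hcast]; exact hcond (k + 1) (by omega)
    by_cases h : PySem.Int.mod t (((k : Int) + 1) * m) = 0
    · have hc : (k + 1) ∣ N := hiff.mp h
      refine ⟨?_, ?_, ?_⟩ <;> simp only [scaleLoopA, h, if_true]
      · omega
      · right
        refine ⟨?_, by omega⟩
        have : ((k : Int) + 1).toNat = k + 1 := by omega
        rw [this]; exact hc
      · intro e _ he2 _
        have : (e : Int) ≤ (k : Int) + 1 := by exact_mod_cast he2
        omega
    · have hnc : ¬ (k + 1) ∣ N := fun hd => h (hiff.mpr hd)
      obtain ⟨ih1, ihs, ihmax⟩ := ih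
      refine ⟨?_, ?_, ?_⟩ <;> simp only [scaleLoopA, h, if_false]
      · exact ih1
      · rcases ihs with h1 | ⟨hd, hle⟩
        · exact Or.inl h1
        · exact Or.inr ⟨hd, by omega⟩
      · intro e he1 he2 hed
        rcases Nat.lt_or_ge e (k + 1) with hlt | hge
        · exact ihmax e he1 (by omega) hed
        · exfalso
          have : e = k + 1 := by omega
          exact hnc (this ▸ hed)

-- at loop exit (d*d > N) the accumulated best is the answer
lemma loopB_stop (R : Int) (N : Nat) (_hN : 1 ≤ N) (d : Nat) (best : Int)
    (hstop : ¬ ((d : Int) * d ≤ (N : Int))) (hb1 : 1 ≤ best)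
    (hbs : best = 1 ∨ (best.toNat ∣ N ∧ best ≤ R))
    (hbcov : ∀ e : Nat, e ∣ N → (e : Int) ≤ R → (e < d ∨ N < e * d) → (e : Int) ≤ best) :
    BBest R N best := by
  refine ⟨hb1, hbs, ?_⟩
  intro e hed heR
  refine hbcov e hed heR ?_
  rcases Nat.lt_or_ge e d with hlt | hge
  · exact Or.inl hlt
  · right
    have hN_lt : (N : Int) < (d : Int) * d := by omega
    have h1 : (d : Int) * d ≤ (e : Int) * d := by
      have : (d : Int) ≤ (e : Int) := by exact_mod_cast hge
      nlinarith [Int.natCast_nonneg d]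
    have : (N : Int) < (e : Int) * d := by omega
    exact_mod_cast this

lemma loopB_best (R : Int) (N : Nat) (hN : 1 ≤ N) :
    ∀ (fuel d : Nat) (best : Int), N + 1 - d ≤ fuel → 1 ≤ d → 1 ≤ best →
      (best = 1 ∨ (best.toNat ∣ N ∧ best ≤ R)) →
      (∀ e : Nat, e ∣ N → (e : Int) ≤ R → (e < d ∨ N < e * d) → (e : Int) ≤ best) →
      BBest R N (scaleLoopB (N : Int) R best d) := by
  intro fuel
  induction fuel with
  | zero =>
    intro d best hfuel hd hb1 hbs hbcov
    have hstop : ¬ ((d : Int) * d ≤ (N : Int)) := by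
      have hNd : N < d := by omega
      have h1 : (N : Int) < (d : Int) := by exact_mod_cast hNd
      have h2 : (1 : Int) ≤ (d : Int) := by exact_mod_cast hd
      nlinarith
    rw [scaleLoopB]
    simp only [hstop, dite_false]
    exact loopB_stop R N hN d best hstop hb1 hbs hbcov
  | succ fuel ih =>
    intro d best hfuel hd hb1 hbs hbcov
    rw [scaleLoopB]
    by_cases hcont : ((d : Int) * d ≤ (N : Int))
    · simp only [hcont, dite_true]
      have hd1 : (1 : Int) ≤ (d : Int) := by exact_mod_cast hd
      have hdN : d ≤ N := by
        have : (d : Int) ≤ (N : Int) := by nlinarith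
        exact_mod_cast this
      have hmodN : PySem.Int.mod (N : Int) (d : Int) = ((N % d : Nat) : Int) :=
        PySem.Int.mod_natCast N d
      have hfdN : PySem.Int.floordiv (N : Int) (d : Int) = ((N / d : Nat) : Int) :=
        PySem.Int.floordiv_natCast N d
      by_cases hdvd : d ∣ N
      · have hmod0 : PySem.Int.mod (N : Int) (d : Int) = 0 := by
          rw [hmodN]
          have hz : N % d = 0 := by
            obtain ⟨u, hu⟩ := hdvd
            rw [hu]; exact Nat.mul_mod_right d u
          simp [hz]
        simp only [hmod0, if_true, hfdN]
        set q : Nat := N / d with hq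
        have hqd : q * d = N := Nat.div_mul_cancel hdvd
        have hq1 : 1 ≤ q := by
          rcases Nat.eq_zero_or_pos q with h0 | h1
          · rw [h0] at hqd; simp at hqd; omega
          · exact h1
        have hqdvd : q ∣ N := ⟨d, by rw [← hqd, Nat.mul_comm]⟩
        set best2 : Int := if (d : Int) ≤ R ∧ best < (d : Int) then (d : Int) else best with hb2
        set best1 : Int := if (q : Int) ≤ R ∧ best2 < (q : Int) then (q : Int) else best2 with hb1d
        have hb21 : 1 ≤ best2 := by rw [hb2]; split <;> omega
        have hb11 : 1 ≤ best1 := by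
          rw [hb1d]; split
          · exact_mod_cast hq1
          · exact hb21
        have hbest2_ge : best ≤ best2 := by rw [hb2]; split <;> omega
        have hbest1_ge : best2 ≤ best1 := by rw [hb1d]; split <;> omega
        have hb2s : best2 = 1 ∨ (best2.toNat ∣ N ∧ best2 ≤ R) := by
          rw [hb2]; split
          · rename_i hcase
            right
            refine ⟨?_, hcase.1⟩
            have : ((d : Int)).toNat = d := by omega
            rw [this]; exact hdvd
          · exact hbs
        have hb1s : best1 = 1 ∨ (best1.toNat ∣ N ∧ best1 ≤ R) := by
          rw [hb1d]; split
          · rename_i hcase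
            right
            refine ⟨?_, hcase.1⟩
            have : ((q : Int)).toNat = q := by omega
            rw [this]; exact hqdvd
          · exact hb2s
        refine ih (d + 1) best1 (by omega) (by omega) hb11 hb1s ?_
        intro e hed heR hecase
        rcases hecase with hlt | hbig
        · rcases Nat.lt_or_ge e d with hlt' | hge
          · have := hbcov e hed heR (Or.inl hlt')
            omega
          · -- e = d: absorbed into best2
            have he_eq : e = d := by omega
            have hd_le2 : (d : Int) ≤ best2 := by
              rw [hb2]; split
              · omega
              · rename_i hcase
                have := not_and.mp hcase (he_eq ▸ heR)
                omega
            rw [he_eq]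
            omega
        · by_cases hold : N < e * d
          · have := hbcov e hed heR (Or.inr hold)
            omega
          · -- e*d ≤ N < e*(d+1) and e ∣ N force e = N/d = q
            rw [not_lt] at hold
            have he1 : 1 ≤ e := Nat.pos_of_dvd_of_pos hed hN
            obtain ⟨f, hf⟩ := hed
            have hfd : f = d := by
              have h1 : e * d ≤ e * f := hf ▸ hold
              have h2 : e * f < e * (d + 1) := hf ▸ hbig
              have hd_le : d ≤ f := Nat.le_of_mul_le_mul_left h1 (by omega)
              have hf_lt : f < d + 1 := Nat.lt_of_mul_lt_mul_left h2
              omega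
            have he_eq : e = q := by
              have hq_eq : q * d = e * d := by
                rw [hqd, hf, hfd]
              exact (Nat.eq_of_mul_eq_mul_right (by omega) hq_eq).symm
            have hq_le1 : (q : Int) ≤ best1 := by
              rw [hb1d]; split
              · omega
              · rename_i hcase
                have := not_and.mp hcase (he_eq ▸ heR)
                omega
            rw [he_eq]
            omega
      · -- d ∤ N: best unchanged, and step d uncovers no new divisor
        have hmodne : ¬ PySem.Int.mod (N : Int) (d : Int) = 0 := by
          rw [hmodN]
          intro hzero
          have : N % d = 0 := by exact_mod_cast hzero
          exact hdvd (Nat.dvd_of_mod_eq_zero this)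
        simp only [hmodne, if_false]
        refine ih (d + 1) best (by omega) (by omega) hb1 hbs ?_
        intro e hed heR hecase
        rcases hecase with hlt | hbig
        · rcases Nat.lt_or_ge e d with hlt' | hge
          · exact hbcov e hed heR (Or.inl hlt')
          · exfalso
            have : e = d := by omega
            exact hdvd (this ▸ hed)
        · by_cases hold : N < e * d
          · exact hbcov e hed heR (Or.inr hold)
          · exfalso
            rw [not_lt] at hold
            have he1 : 1 ≤ e := Nat.pos_of_dvd_of_pos hed hN
            obtain ⟨f, hf⟩ := hed
            have hfd : f = d := by
              have h1 : e * d ≤ e * f := hf ▸ hold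
              have h2 : e * f < e * (d + 1) := hf ▸ hbig
              have hd_le : d ≤ f := Nat.le_of_mul_le_mul_left h1 (by omega)
              have hf_lt : f < d + 1 := Nat.lt_of_mul_lt_mul_left h2
              omega
            exact hdvd ⟨e, by rw [hf, hfd, Nat.mul_comm]⟩
    · simp only [hcont, dite_false]
      exact loopB_stop R N hN d best hcont hb1 hbs hbcov

-- ===== VERDICT (by name: the statement is the Claim_ definition above) =====
theorem scale_device_batch_size_spec : Claim_equal_scale_device_batch_size := by
  intro b p t m _hdom hpre
  obtain ⟨hm, _⟩ := hpre
  unfold Spec_scale_device_batch_size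
  simp only [scale_device_batch_size, scale_device_batch_size_alt]
  set R : Int := max 1 (PySem.Int.truncdiv (b * p) 100) with hRdef
  have hR : 1 ≤ R := le_max_left 1 _
  have hKR : ((R.toNat : Nat) : Int) = R := by omega
  by_cases hdvd : m ∣ t
  · have hmod : PySem.Int.mod t m = 0 := (PySem.Int.mod_eq_zero_iff_dvd t m).mpr hdvd
    rw [if_neg (by simp [hmod])]
    obtain ⟨c, hc⟩ := hdvd
    have hfd : PySem.Int.floordiv t m = c := by
      have h1 := PySem.Int.floordiv_mul_add_mod t m
      rw [hmod, add_zero] at h1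
      have h2 : PySem.Int.floordiv t m * m = c * m := by rw [h1, hc]; ring
      exact mul_right_cancel₀ hm h2
    by_cases hczero : c = 0
    · -- t = 0: B returns requested; A's first iteration fires
      have ht0 : t = 0 := by rw [hc, hczero, mul_zero]
      rw [if_pos (by rw [hfd, hczero]; simp)]
      obtain ⟨k, hk⟩ : ∃ k, R.toNat = k + 1 := ⟨R.toNat - 1, by omega⟩
      rw [hk]
      have : PySem.Int.mod t (((k : Int) + 1) * m) = 0 := by
        rw [PySem.Int.mod_eq_zero_iff_dvd, ht0]
        exact dvd_zero _
      simp only [scaleLoopA, this, if_true]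
      omega
    · -- t ≠ 0: both sides compute the largest divisor of N = |t // m| bounded by R
      set N : Nat := c.natAbs with hNdef
      have hN : 1 ≤ N := by
        have : c.natAbs ≠ 0 := Int.natAbs_ne_zero.mpr hczero
        omega
      have habs : |PySem.Int.floordiv t m| = (N : Int) := by
        rw [hfd, Int.abs_eq_natAbs]
      rw [habs, if_neg (by exact_mod_cast (by omega : (N : Int) ≠ 0))]
      have hcond : ∀ k : Nat, 1 ≤ k → (PySem.Int.mod t ((k : Int) * m) = 0 ↔ k ∣ N) := by
        intro k hk
        rw [PySem.Int.mod_eq_zero_iff_dvd]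
        have h1 : ((k : Int) * m ∣ t) ↔ ((k : Int) ∣ c) := by
          rw [hc, mul_comm m c]
          exact mul_dvd_mul_iff_right hm
        have h2 : ((k : Int) ∣ c) ↔ (k ∣ N) := by
          rw [← Int.dvd_natAbs, ← hNdef]
          exact Int.natCast_dvd_natCast
        exact h1.trans h2
      -- A side
      obtain ⟨hA1, hAs, hAmax⟩ := loopA_best t m N hcond R.toNat
      have hABest : BBest R N (scaleLoopA t m R.toNat) := by
        refine ⟨hA1, ?_, ?_⟩
        · rcases hAs with h1 | ⟨hd, hle⟩
          · exact Or.inl h1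
          · exact Or.inr ⟨hd, by omega⟩
        · intro e hed heR
          have he1 : 1 ≤ e := Nat.pos_of_dvd_of_pos hed hN
          exact hAmax e he1 (by omega) hed
      -- B side
      have hBBest : BBest R N (scaleLoopB (N : Int) R 1 1) := by
        refine loopB_best R N hN (N + 1) 1 1 (by omega) (by omega) (by omega) (Or.inl rfl) ?_
        intro e hed heR hecase
        rcases hecase with hlt | hbig
        · have he0 : e = 0 := by omega
          simp [he0]
        · exfalso
          have heN : e ≤ N := Nat.le_of_dvd hN hed
          have hbig' : N < e := by simpa using hbig
          omega
      exact BBest_unique R N hABest hBBest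
  · -- m ∤ t: B returns 1 via the early test; A's loop never fires
    have hmodne : PySem.Int.mod t m ≠ 0 :=
      fun h => hdvd ((PySem.Int.mod_eq_zero_iff_dvd t m).mp h)
    rw [if_pos hmodne]
    have hloop : ∀ K, scaleLoopA t m K = 1 := by
      intro K
      induction K with
      | zero => rfl
      | succ k ih =>
        have hne : PySem.Int.mod t (((k : Int) + 1) * m) ≠ 0 :=
          fun h => hdvd (dvd_trans (dvd_mul_left m ((k : Int) + 1))
            ((PySem.Int.mod_eq_zero_iff_dvd t (((k : Int) + 1) * m)).mp h))
        simp only [scaleLoopA, hne, if_false]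
        exact ih
    exact hloop R.toNat
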